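-- pv_equiv track=rewrite | github.com/securifera/crapsecrets | crapsecrets/helpers.py | get_directories
-- ===== SOURCE A (Python) =====
-- def get_directories(path):
--     # Remove any trailing slash
--     path = path.rstrip('/')
--     # Split the path into parts, ignoring the first empty string from the leading '/'
--     parts = path.split('/')[1:]
--
--     # Check if the last part is likely a file (contains a dot)
--     if '.' in parts[-1]:
--         parts = parts[:-1]
--
--     # Build up each directory level
--     directories = []
--     current_path = ""
--     for part in parts:
--         current_path += "/" + part
--         directories.append(current_path)
--     return directories
-- ===== SOURCE B (Python) =====
-- def get_directories(path):
--     parts = path.rstrip('/').split('/')[1:]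
--     n = len(parts) - (1 if '.' in parts[-1] else 0)
--     return ['/' + '/'.join(parts[:i + 1]) for i in range(n)]
-- ===== Notes on version B (the rewrite author's own statement) =====
-- stated objective: alternative
-- what changed: Replaces the accumulator loop that extends a running current_path string with an index comprehension that builds each cumulative directory independently as '/' + '/'.join(parts[:i+1]).
-- outside the precondition, e.g. on get_directories('abc'): A raises IndexError, B raises IndexError; on get_directories('/'): A raises IndexError, B raises IndexError
import Mathlib
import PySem

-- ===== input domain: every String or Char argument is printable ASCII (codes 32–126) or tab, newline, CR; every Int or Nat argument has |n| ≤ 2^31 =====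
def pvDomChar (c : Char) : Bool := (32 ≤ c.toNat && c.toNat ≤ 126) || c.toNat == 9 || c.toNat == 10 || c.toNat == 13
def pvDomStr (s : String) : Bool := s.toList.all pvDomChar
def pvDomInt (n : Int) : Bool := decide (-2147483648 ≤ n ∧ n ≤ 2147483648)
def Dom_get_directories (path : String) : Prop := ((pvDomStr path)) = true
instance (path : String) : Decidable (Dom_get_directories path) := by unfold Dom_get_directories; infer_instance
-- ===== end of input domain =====

-- B builds each cumulative directory independently ('/' + '/'.join(parts[:i+1]) for i in range(n))
-- instead of threading a running accumulator string through a loop; objective: alternative decomposition.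

-- shared preprocessing: Python's path.rstrip('/') — exact hand port for the single strip char '/'
def pvRstripSlash (cs : List Char) : List Char := (cs.reverse.dropWhile (· == '/')).reverse

-- ===== PORT A =====
-- body of A after parts = path.rstrip('/').split('/')[1:]
def pvDirsA (parts : List (List Char)) : List String :=
  match PySem.List.pyGet? parts (-1) with   -- '.' in parts[-1]  (IndexError on [] : excluded by Pre_)
  | none => []
  | some last =>
    ((if PySem.Chars.isIn ['.'] last then PySem.List.slice parts none (some (-1)) else parts).foldl
      (fun (st : List (List Char) × List Char) part =>
        (st.1 ++ [st.2 ++ '/' :: part], st.2 ++ '/' :: part)) ([], [])).1.map String.ofList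

def get_directories (path : String) : List String :=
  pvDirsA ((PySem.Chars.splitOn (pvRstripSlash path.toList) ['/']).drop 1)

-- ===== PORT B =====
-- body of B after parts = path.rstrip('/').split('/')[1:]
def pvDirsB (parts : List (List Char)) : List String :=
  match parts.getLast? with                 -- parts[-1]  (IndexError on [] : excluded by Pre_)
  | none => []
  | some last =>
    (List.range (parts.length - (if PySem.Chars.isIn ['.'] last then 1 else 0))).map
      (fun i => String.ofList ('/' :: PySem.Chars.join ['/'] (parts.take (i + 1))))

def get_directories_alt (path : String) : List String :=
  pvDirsB ((PySem.Chars.splitOn (pvRstripSlash path.toList) ['/']).drop 1)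

-- ===== PRECONDITION & SPEC =====
-- Pre_ excludes exactly the paths whose '/'-stripped form contains no '/' (the split yields a single
-- piece, so parts is empty): there the Python A raises IndexError at parts[-1] (and B does too).
def Pre_get_directories (path : String) : Prop :=
  1 < (PySem.Chars.splitOn (pvRstripSlash path.toList) ['/']).length
instance (path : String) : Decidable (Pre_get_directories path) := by unfold Pre_get_directories; infer_instance
def pvWitness_get_directories : String := "/a/b.txt"

def Spec_get_directories (path : String) (out : List String) : Prop := out = get_directories_alt path
instance (path : String) (out : List String) : Decidable (Spec_get_directories path out) := by unfold Spec_get_directories; infer_instance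

-- ===== CLAIM (what is proved, stated in full; the proofs are below) =====
def Claim_equal_get_directories : Prop := ∀ (path : String), Dom_get_directories path → Pre_get_directories path → Spec_get_directories path (get_directories path)

-- ===== LEMMAS AND PROOFS =====

-- '/'-join of a nonempty cons
theorem pv_join_cons (p : List Char) (xs : List (List Char)) (h : xs ≠ []) :
    PySem.Chars.join ['/'] (p :: xs) = p ++ '/' :: PySem.Chars.join ['/'] xs := by
  cases xs with
  | nil => simp at h
  | cons b t => rw [PySem.Chars.join_cons_cons]; simp

-- A's accumulator loop computes exactly B's join-of-prefixes, for any starting state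
theorem pv_fold_eq_prefixes (parts : List (List Char)) :
    ∀ (dirs : List (List Char)) (cur : List Char),
    (parts.foldl (fun (st : List (List Char) × List Char) part =>
        (st.1 ++ [st.2 ++ '/' :: part], st.2 ++ '/' :: part)) (dirs, cur)).1
      = dirs ++ (List.range parts.length).map
          (fun i => cur ++ '/' :: PySem.Chars.join ['/'] (parts.take (i + 1))) := by
  induction parts with
  | nil => intro dirs cur; simp
  | cons p ps ih =>
    intro dirs cur
    have htail : ∀ i ∈ List.range ps.length,
        (cur ++ '/' :: p) ++ '/' :: PySem.Chars.join ['/'] (ps.take (i + 1))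
          = cur ++ '/' :: PySem.Chars.join ['/'] ((p :: ps).take (i + 1 + 1)) := by
      intro i hi
      have hi' : i < ps.length := List.mem_range.mp hi
      have hne2 : ps.take (i + 1) ≠ [] := by
        simp only [ne_eq, List.take_eq_nil_iff]
        rintro (h | h)
        · omega
        · subst h; simp at hi'
      rw [List.take_succ_cons, pv_join_cons p (ps.take (i + 1)) hne2]
      simp
    simp only [List.foldl_cons]
    rw [ih, List.map_congr_left htail]
    simp only [List.length_cons, List.range_succ_eq_map, List.map_cons, List.map_map,
      List.take_succ_cons, List.take_zero, PySem.Chars.join_singleton, Function.comp_def]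
    simp

-- Python's l[-1] on a nonempty list is its last element
theorem pv_pyGet_neg_one {α : Type} (l : List α) (h : l ≠ []) :
    PySem.List.pyGet? l (-1) = l.getLast? := by
  have hl : 0 < l.length := List.length_pos_iff.mpr h
  unfold PySem.List.pyGet? PySem.List.pyIdx?
  rw [if_neg (by omega), if_pos (by omega)]
  simp only [Option.bind]
  rw [List.getLast?_eq_getElem?]
  congr 1

-- the two loop bodies agree on any nonempty parts list
theorem pv_dirs_eq (parts : List (List Char)) (hne : parts ≠ []) : pvDirsA parts = pvDirsB parts := by
  unfold pvDirsA pvDirsB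
  rw [pv_pyGet_neg_one parts hne]
  cases hlast : parts.getLast? with
  | none => exact absurd (List.getLast?_eq_none_iff.mp hlast) hne
  | some last =>
    by_cases hc : PySem.Chars.isIn ['.'] last
    · simp only [hc, if_true]
      have hsl : PySem.List.slice parts none (some (-1)) = parts.dropLast := by simp [pysem]
      rw [hsl, pv_fold_eq_prefixes]
      simp only [List.nil_append, List.map_map, List.length_dropLast]
      apply List.map_congr_left
      intro i hi
      have hi' : i < parts.length - 1 := List.mem_range.mp hi
      simp only [Function.comp_apply]
      congr 3
      rw [List.dropLast_eq_take, List.take_take]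
      congr 1
      omega
    · simp only [hc]
      rw [pv_fold_eq_prefixes]
      simp [List.map_map, Function.comp_def]

-- ===== VERDICT (by name: the statement is the Claim_ definition above) =====
theorem get_directories_spec : Claim_equal_get_directories := by
  intro path _ hpre
  unfold Spec_get_directories get_directories get_directories_alt
  apply pv_dirs_eq
  unfold Pre_get_directories at hpre
  simp only [ne_eq, List.drop_eq_nil_iff]
  omega
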